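-- pv_equiv track=rewrite | github.com/hdmquan/taxon_subsequence_matcher | find.py | fmt
-- ===== SOURCE A (Python) =====
-- def fmt(name: str, positions: list[int]) -> str:
--     matched = set(positions)
--     out = []
--     i = 0
--     while i < len(name):
--         if i in matched:
--             run = []
--             while i < len(name) and i in matched:
--                 run.append(name[i].upper())
--                 i += 1
--             out.append(f"**{''.join(run)}**")
--         else:
--             out.append(name[i].lower())
--             i += 1
--     return "".join(out)
-- ===== SOURCE B (Python) =====
-- def fmt(name: str, positions: list[int]) -> str:
--     matched = set(positions)
--     n = len(name)
--     parts = []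
--     for i, c in enumerate(name):
--         m = i in matched
--         start = m and not (i > 0 and (i - 1) in matched)
--         end = m and not (i + 1 < n and (i + 1) in matched)
--         parts.append(("**" if start else "")
--                      + (c.upper() if m else c.lower())
--                      + ("**" if end else ""))
--     return "".join(parts)
-- ===== Notes on version B (the rewrite author's own statement) =====
-- stated objective: alternative
-- what changed: A accumulates each matched run in a nested inner while-loop and wraps it in '**' afterwards; B does one flat pass over the indices, deciding locally from neighbour membership where a run starts (emit opening '**') and ends (emit closing '**').
import Mathlib
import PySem

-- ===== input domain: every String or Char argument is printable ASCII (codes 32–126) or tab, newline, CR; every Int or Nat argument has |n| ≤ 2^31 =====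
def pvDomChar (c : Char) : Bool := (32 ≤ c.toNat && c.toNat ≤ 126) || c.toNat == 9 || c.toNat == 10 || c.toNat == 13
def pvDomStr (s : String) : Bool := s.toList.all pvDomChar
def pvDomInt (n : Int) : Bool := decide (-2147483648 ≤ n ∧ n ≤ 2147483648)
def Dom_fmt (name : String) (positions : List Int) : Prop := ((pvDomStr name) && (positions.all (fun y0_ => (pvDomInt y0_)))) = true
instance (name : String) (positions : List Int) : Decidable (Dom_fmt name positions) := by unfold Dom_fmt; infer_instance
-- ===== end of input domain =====

-- B replaces A's nested "accumulate a run, then wrap it" loop by one flat pass doing local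
-- boundary detection (neighbour membership decides where '**' goes); alternative decomposition, same cost.


-- ===== PORT A =====
-- the inner 'while i < len(name) and i in matched' run loop: returns (uppercased run, rest of the chars, index after the run)
def fmtAcollect (m : PySem.Set Int) : List Char → Int → (List Char × List Char × Int)
  | [], i => ([], [], i)
  | c :: cs, i =>
    if m.contains i then
      let r := fmtAcollect m cs (i + 1)
      (PySem.Chars.upperChar c :: r.1, r.2.1, r.2.2)
    else ([], c :: cs, i)

theorem fmtAcollect_rest_le (m : PySem.Set Int) (cs : List Char) (i : Int) :
    (fmtAcollect m cs i).2.1.length ≤ cs.length := by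
  induction cs generalizing i with
  | nil => simp [fmtAcollect]
  | cons c cs ih =>
    simp only [fmtAcollect]
    split
    · exact le_trans (ih _) (Nat.le_succ _)
    · simp

-- the outer 'while i < len(name)' loop of A
def fmtAgo (m : PySem.Set Int) : List Char → Int → List Char
  | [], _ => []
  | c :: cs, i =>
    if m.contains i then
      let r := fmtAcollect m cs (i + 1)
      '*' :: '*' :: PySem.Chars.upperChar c :: (r.1 ++ '*' :: '*' :: fmtAgo m r.2.1 r.2.2)
    else
      PySem.Chars.lowerChar c :: fmtAgo m cs (i + 1)
termination_by cs _ => cs.length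
decreasing_by
  · exact Nat.lt_succ_of_le (fmtAcollect_rest_le m _ _)
  · simp

def fmt (name : String) (positions : List Int) : String :=
  String.ofList (fmtAgo (PySem.Set.ofList positions) name.toList 0)

-- ===== PORT B =====
-- the piece emitted for one index i: opening '**' at a run start, the cased char, closing '**' at a run end
def fmtBpiece (m : PySem.Set Int) (n : Int) (i : Int) (c : Char) : List Char :=
  let mi := m.contains i
  (if mi && !(decide (0 < i) && m.contains (i - 1)) then ['*', '*'] else [])
    ++ [if mi then PySem.Chars.upperChar c else PySem.Chars.lowerChar c]
    ++ (if mi && !(decide (i + 1 < n) && m.contains (i + 1)) then ['*', '*'] else [])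

def fmt_alt (name : String) (positions : List Int) : String :=
  let m := PySem.Set.ofList positions
  let cs := name.toList
  let n : Int := cs.length
  String.ofList (((PySem.List.enumerate cs).map (fun p => fmtBpiece m n p.1 p.2)).flatten)

-- ===== PRECONDITION & SPEC =====
def Spec_fmt (name : String) (positions : List Int) (out : String) : Prop := out = fmt_alt name positions
instance (name : String) (positions : List Int) (out : String) : Decidable (Spec_fmt name positions out) := by unfold Spec_fmt; infer_instance

-- ===== CLAIM (what is proved, stated in full; the proofs are below) =====
def Claim_equal_fmt : Prop := ∀ (name : String) (positions : List Int), Dom_fmt name positions → Spec_fmt name positions (fmt name positions)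

-- ===== LEMMAS AND PROOFS =====

-- the flattened B pieces for a tail cs starting at index i
def fmtBpieces (m : PySem.Set Int) (n : Int) (cs : List Char) (i : Int) : List Char :=
  ((PySem.List.enumerate cs i).map (fun p => fmtBpiece m n p.1 p.2)).flatten

theorem fmtBpieces_nil (m : PySem.Set Int) (n i : Int) : fmtBpieces m n [] i = [] := rfl

theorem fmtBpieces_cons (m : PySem.Set Int) (n : Int) (c : Char) (cs : List Char) (i : Int) :
    fmtBpieces m n (c :: cs) i = fmtBpiece m n i c ++ fmtBpieces m n cs (i + 1) := by
  simp [fmtBpieces, PySem.List.enumerate_cons]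

-- Main: A's outer loop from index i equals B's pieces from i, provided i is not strictly
-- inside a run (the invariant A's outer loop maintains).
-- Q: after A has consumed the matched char at index i, the rest of the run collected by
-- fmtAcollect plus the closing '**' plus the continuation equals the closing stars of
-- piece i plus B's pieces from i+1.
theorem fmt_both (m : PySem.Set Int) (cs : List Char) :
    (∀ (i n : Int), 0 ≤ i → n = i + cs.length →
       (m.contains i = true → (decide (0 < i) && m.contains (i - 1)) = false) →
       fmtAgo m cs i = fmtBpieces m n cs i)
    ∧ (∀ (i n : Int), 0 ≤ i → m.contains i = true → n = (i + 1) + cs.length →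
       (fmtAcollect m cs (i + 1)).1
           ++ '*' :: '*' :: fmtAgo m (fmtAcollect m cs (i + 1)).2.1 (fmtAcollect m cs (i + 1)).2.2
         = (if cs = [] ∨ m.contains (i + 1) = false then ['*', '*'] else [])
             ++ fmtBpieces m n cs (i + 1)) := by
  induction cs with
  | nil =>
    constructor
    · intro i n _ _ _; simp [fmtAgo, fmtBpieces_nil]
    · intro i n _ _ _; simp [fmtAcollect, fmtAgo, fmtBpieces_nil]
  | cons c cs ih =>
    have hmain : ∀ (i n : Int), 0 ≤ i → n = i + (c :: cs).length →
        (m.contains i = true → (decide (0 < i) && m.contains (i - 1)) = false) →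
        fmtAgo m (c :: cs) i = fmtBpieces m n (c :: cs) i := by
      intro i n hpos hn hinv
      by_cases hi : m.contains i = true
      · -- matched: A opens a run
        have hstart := hinv hi
        have hq := ih.2 i n hpos hi (by simp at hn ⊢; omega)
        rw [fmtAgo, if_pos hi, fmtBpieces_cons]
        have hpiece : fmtBpiece m n i c
            = '*' :: '*' :: PySem.Chars.upperChar c ::
                (if cs = [] ∨ m.contains (i + 1) = false then ['*', '*'] else []) := by
          have hend : (decide (i + 1 < n) && m.contains (i + 1))
              = !(decide (cs = [] ∨ m.contains (i + 1) = false)) := by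
            have hlt : (i + 1 < n) ↔ cs ≠ [] := by
              simp at hn
              constructor
              · intro h hcs; subst hcs; simp at hn; omega
              · intro h; have : 0 < (cs.length : Int) := by
                  have := List.length_pos_iff.mpr h; exact_mod_cast this
                omega
            by_cases hcs : cs = [] <;> by_cases hn1 : m.contains (i + 1) = true <;>
              simp_all
          simp only [fmtBpiece, hi, hstart, hend]
          by_cases h : (cs = [] ∨ m.contains (i + 1) = false) <;> simp
        rw [hpiece]
        simp only [List.cons_append] at hq ⊢
        rw [hq]
      · -- unmatched: A lowercases one char
        have hi' : m.contains i = false := by simpa using hi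
        have him : i ∉ m := by rw [← PySem.Set.contains_iff]; exact hi
        have hrec := ih.1 (i + 1) n (by omega) (by simp at hn ⊢; omega)
          (fun _ => by
            have h2 : i + 1 - 1 = i := by ring
            rw [h2, hi']; simp)
        rw [fmtAgo, if_neg hi, fmtBpieces_cons, hrec]
        have : fmtBpiece m n i c = [PySem.Chars.lowerChar c] := by
          simp [fmtBpiece, him]
        rw [this]; rfl
    refine ⟨hmain, ?_⟩
    intro i n hpos hi hn
    by_cases h1 : m.contains (i + 1) = true
    · -- run continues through i+1
      have hq := ih.2 (i + 1) n (by omega) h1 (by simp at hn ⊢; omega)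
      rw [fmtAcollect, if_pos h1]
      have hpiece : fmtBpiece m n (i + 1) c
          = PySem.Chars.upperChar c ::
              (if cs = [] ∨ m.contains (i + 1 + 1) = false then ['*', '*'] else []) := by
        have hstart : (decide (0 < i + 1) && m.contains (i + 1 - 1)) = true := by
          have h2 : i + 1 - 1 = i := by ring
          have h3 : (0 : Int) < i + 1 := by omega
          simp [h2, h3]
          rw [← PySem.Set.contains_iff]; exact hi
        have hend : (decide (i + 1 + 1 < n) && m.contains (i + 1 + 1))
            = !(decide (cs = [] ∨ m.contains (i + 1 + 1) = false)) := by
          have hlt : (i + 1 + 1 < n) ↔ cs ≠ [] := by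
            simp at hn
            constructor
            · intro h hcs; subst hcs; simp at hn; omega
            · intro h; have : 0 < (cs.length : Int) := by
                have := List.length_pos_iff.mpr h; exact_mod_cast this
              omega
          by_cases hcs : cs = [] <;> by_cases hn1 : m.contains (i + 1 + 1) = true <;>
            simp_all
        simp only [fmtBpiece, h1, hstart, hend]
        by_cases h : (cs = [] ∨ m.contains (i + 1 + 1) = false) <;> simp
      rw [fmtBpieces_cons, hpiece]
      have hnil : (if (c :: cs) = [] ∨ m.contains (i + 1) = false then ['*', '*'] else [])
          = ([] : List Char) := by
        simp
        rw [← PySem.Set.contains_iff]; exact h1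
      rw [hnil, List.nil_append]
      simp only [List.cons_append] at hq ⊢
      rw [hq]
    · -- run ends right before i+1
      have h1' : m.contains (i + 1) = false := by simpa using h1
      have h1m : i + 1 ∉ m := by rw [← PySem.Set.contains_iff]; exact h1
      have hrec := hmain (i + 1) n (by omega) (by simp at hn ⊢; omega)
        (fun hc => absurd hc h1)
      rw [fmtAcollect, if_neg h1]
      simp [h1m, hrec]

-- ===== VERDICT (by name: the statement is the Claim_ definition above) =====
theorem fmt_spec : Claim_equal_fmt := by
  intro name positions _
  unfold Spec_fmt fmt fmt_alt
  congr 1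
  exact (fmt_both _ _).1 0 _ le_rfl (by simp) (fun _ => by simp)
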